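-- pv_equiv track=rewrite | github.com/akashbulbule/smart-data | Context.py | contextualization
-- ===== SOURCE A (Python) =====
-- def contextualization(word):
-- 	category = ['MyChoice','NetNeutrality','ObamaTownHall','TaxDay']
-- 	d = dict( (category[i],{}) for i in range(len(category)))
-- 	d['MyChoice'][1]=['good','nice','massive','better','prime']
-- 	d['MyChoice'][2]=['bad','directionless','blind','empty']
-- 	d['TaxDay'][1]=['free','big','new','more','wonderful','better','best']
-- 	d['TaxDay'][2]=['happy','worst','time-consuming','black','old','middle-class','complicated','hate','late','last']
-- 	d['NetNeutrality'][1]=['free','big','equal','co-exist','important']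
-- 	d['NetNeutrality'][2]=['utopian','exclusive-access','long','discriminatory']
-- 	d['ObamaTownHall'][1]=['free','more','deductible','whole','high']
-- 	d['ObamaTownHall'][2]=['expensive','no-brainer','poor','middle-class','low','less']
-- 	for element in d.keys():
-- 		if word in d[element][1]:
-- 			return 1
-- 		if word in d[element][2]:
-- 			return 2
-- 	return -1
-- ===== SOURCE B (Python) =====
-- # B: one flat positive set and one flat negative set (union over all four
-- # categories, which share no word across polarity), two membership tests.
-- _POS = frozenset(['good','nice','massive','better','prime',
--                   'free','big','equal','co-exist','important',
--                   'more','deductible','whole','high',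
--                   'new','wonderful','best'])
-- _NEG = frozenset(['bad','directionless','blind','empty',
--                   'utopian','exclusive-access','long','discriminatory',
--                   'expensive','no-brainer','poor','middle-class','low','less',
--                   'happy','worst','time-consuming','black','old',
--                   'complicated','hate','late','last'])
--
-- def contextualization(word):
--     if word in _POS:
--         return 1
--     if word in _NEG:
--         return 2
--     return -1
-- ===== Notes on version B (the rewrite author's own statement) =====
-- stated objective: simpler
-- what changed: Replaced A's nested per-category dict and its outer loop over four category keys by one flat positive set and one flat negative set (the polarity vocabularies are disjoint, so category order is irrelevant) with two membership tests.
import Mathlib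
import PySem

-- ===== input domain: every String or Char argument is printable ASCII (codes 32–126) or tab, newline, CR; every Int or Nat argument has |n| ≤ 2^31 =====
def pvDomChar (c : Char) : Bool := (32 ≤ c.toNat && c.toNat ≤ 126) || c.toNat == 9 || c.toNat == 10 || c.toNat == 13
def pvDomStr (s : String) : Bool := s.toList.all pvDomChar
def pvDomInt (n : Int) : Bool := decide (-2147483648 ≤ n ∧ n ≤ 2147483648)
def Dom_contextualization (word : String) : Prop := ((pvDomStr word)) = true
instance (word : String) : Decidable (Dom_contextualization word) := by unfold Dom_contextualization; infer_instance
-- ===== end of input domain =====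

-- B replaces A's per-category nested dict and its outer key loop by one flat
-- positive set and one flat negative set with two membership tests (simpler).


-- ===== PORT A =====
-- the 'for element in d.keys(): if word in d[element][1] … if word in d[element][2] …' loop,
-- with early return as structural recursion over the remaining keys
def ctxLoop (d : PySem.Dict String (PySem.Dict Int (List String))) (word : String) :
    List String → Int
  | [] => -1
  | element :: rest =>
    if ((d.getD element PySem.Dict.empty).getD 1 []).contains word then 1
    else if ((d.getD element PySem.Dict.empty).getD 2 []).contains word then 2
    else ctxLoop d word rest

def contextualization (word : String) : Int :=
  let category : List String := ["MyChoice", "NetNeutrality", "ObamaTownHall", "TaxDay"]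
  -- d = dict((category[i], {}) for i in range(len(category)))
  let d : PySem.Dict String (PySem.Dict Int (List String)) :=
    (PySem.List.pyRange 0 (PySem.List.len category) 1).foldl
      (fun d i => d.insert (PySem.List.pyGetD category i "") PySem.Dict.empty)
      PySem.Dict.empty
  let d := d.modify "MyChoice" PySem.Dict.empty
    (fun m => m.insert 1 ["good", "nice", "massive", "better", "prime"])
  let d := d.modify "MyChoice" PySem.Dict.empty
    (fun m => m.insert 2 ["bad", "directionless", "blind", "empty"])
  let d := d.modify "TaxDay" PySem.Dict.empty
    (fun m => m.insert 1 ["free", "big", "new", "more", "wonderful", "better", "best"])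
  let d := d.modify "TaxDay" PySem.Dict.empty
    (fun m => m.insert 2 ["happy", "worst", "time-consuming", "black", "old", "middle-class",
                          "complicated", "hate", "late", "last"])
  let d := d.modify "NetNeutrality" PySem.Dict.empty
    (fun m => m.insert 1 ["free", "big", "equal", "co-exist", "important"])
  let d := d.modify "NetNeutrality" PySem.Dict.empty
    (fun m => m.insert 2 ["utopian", "exclusive-access", "long", "discriminatory"])
  let d := d.modify "ObamaTownHall" PySem.Dict.empty
    (fun m => m.insert 1 ["free", "more", "deductible", "whole", "high"])
  let d := d.modify "ObamaTownHall" PySem.Dict.empty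
    (fun m => m.insert 2 ["expensive", "no-brainer", "poor", "middle-class", "low", "less"])
  ctxLoop d word (PySem.Dict.keys d)

-- ===== PORT B =====
def ctxPos : PySem.Set String := PySem.Set.ofList
  ["good", "nice", "massive", "better", "prime",
   "free", "big", "equal", "co-exist", "important",
   "more", "deductible", "whole", "high",
   "new", "wonderful", "best"]

def ctxNeg : PySem.Set String := PySem.Set.ofList
  ["bad", "directionless", "blind", "empty",
   "utopian", "exclusive-access", "long", "discriminatory",
   "expensive", "no-brainer", "poor", "middle-class", "low", "less",
   "happy", "worst", "time-consuming", "black", "old",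
   "complicated", "hate", "late", "last"]

def contextualization_alt (word : String) : Int :=
  if PySem.Set.contains ctxPos word then 1
  else if PySem.Set.contains ctxNeg word then 2
  else -1

-- ===== PRECONDITION & SPEC =====
def Spec_contextualization (word : String) (out : Int) : Prop := out = contextualization_alt word
instance (word : String) (out : Int) : Decidable (Spec_contextualization word out) := by unfold Spec_contextualization; infer_instance

-- ===== CLAIM (what is proved, stated in full; the proofs are below) =====
def Claim_equal_contextualization : Prop := ∀ (word : String), Dom_contextualization word → Spec_contextualization word (contextualization word)

-- ===== LEMMAS AND PROOFS =====
-- every word mentioned by either program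
def ctxAll : List String := ctxPos ++ ctxNeg

-- A's whole closed dict/key computation evaluated: the loop in category-insertion order
lemma A_unfold (word : String) : contextualization word =
  if (["good", "nice", "massive", "better", "prime"].contains word) then 1
  else if (["bad", "directionless", "blind", "empty"].contains word) then 2
  else if (["free", "big", "equal", "co-exist", "important"].contains word) then 1
  else if (["utopian", "exclusive-access", "long", "discriminatory"].contains word) then 2
  else if (["free", "more", "deductible", "whole", "high"].contains word) then 1
  else if (["expensive", "no-brainer", "poor", "middle-class", "low", "less"].contains word) then 2
  else if (["free", "big", "new", "more", "wonderful", "better", "best"].contains word) then 1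
  else if (["happy", "worst", "time-consuming", "black", "old", "middle-class",
            "complicated", "hate", "late", "last"].contains word) then 2
  else -1 := rfl

lemma B_unfold (word : String) : contextualization_alt word =
  if (["good", "nice", "massive", "better", "prime",
       "free", "big", "equal", "co-exist", "important",
       "more", "deductible", "whole", "high",
       "new", "wonderful", "best"].contains word) then 1
  else if (["bad", "directionless", "blind", "empty",
       "utopian", "exclusive-access", "long", "discriminatory",
       "expensive", "no-brainer", "poor", "middle-class", "low", "less",
       "happy", "worst", "time-consuming", "black", "old",
       "complicated", "hate", "late", "last"].contains word) then 2
  else -1 := rfl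

lemma ctx_eq (word : String) : contextualization word = contextualization_alt word := by
  by_cases h : word ∈ ctxAll
  · simp only [ctxAll, List.mem_append, PySem.Set.mem_ofList, ctxPos, ctxNeg,
      List.mem_cons, List.not_mem_nil, or_false] at h
    rcases h with (rfl | rfl | rfl | rfl | rfl | rfl | rfl | rfl | rfl | rfl | rfl | rfl | rfl |
      rfl | rfl | rfl | rfl) | (rfl | rfl | rfl | rfl | rfl | rfl | rfl | rfl | rfl | rfl | rfl |
      rfl | rfl | rfl | rfl | rfl | rfl | rfl | rfl | rfl | rfl | rfl | rfl) <;> decide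
  · simp only [ctxAll, List.mem_append, PySem.Set.mem_ofList, ctxPos, ctxNeg,
      List.mem_cons, List.not_mem_nil, or_false, not_or] at h
    rw [A_unfold, B_unfold]
    simp [List.contains_eq_mem, h]

-- ===== VERDICT (by name: the statement is the Claim_ definition above) =====
theorem contextualization_spec : Claim_equal_contextualization := by
  intro word _
  unfold Spec_contextualization
  exact ctx_eq word
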